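-- pv_equiv track=rewrite | github.com/roshhellwett/nf-metro | src/nf_metro/layout/auto_layout.py | _transitive_successors
-- ===== SOURCE A (Python) =====
-- from collections import defaultdict, deque
--
-- def _transitive_successors(
--     section_id: str,
--     successors: dict[str, set[str]],
-- ) -> set[str]:
--     """Compute all transitive successors of a section in the DAG."""
--     result: set[str] = set()
--     queue = deque(successors.get(section_id, set()))
--     while queue:
--         sid = queue.popleft()
--         if sid in result:
--             continue
--         result.add(sid)
--         queue.extend(successors.get(sid, set()))
--     return result
-- ===== SOURCE B (Python) =====
-- def _transitive_successors(
--     section_id: str,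
--     successors: dict[str, set[str]],
-- ) -> set[str]:
--     """Compute all transitive successors via level-by-level frontier expansion."""
--     result: set[str] = set()
--     frontier = set(successors.get(section_id, set())) - result
--     while frontier:
--         result |= frontier
--         nxt: set[str] = set()
--         for s in frontier:
--             nxt |= successors.get(s, set())
--         frontier = nxt - result
--     return result
-- ===== Notes on version B (the rewrite author's own statement) =====
-- stated objective: alternative
-- what changed: Replaces the deque-based node-at-a-time BFS worklist (pop, membership test, extend) by level-by-level frontier expansion using set operations: each iteration unions the whole frontier into the result and computes the next frontier as the successors of the frontier minus the result.
import Mathlib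
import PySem

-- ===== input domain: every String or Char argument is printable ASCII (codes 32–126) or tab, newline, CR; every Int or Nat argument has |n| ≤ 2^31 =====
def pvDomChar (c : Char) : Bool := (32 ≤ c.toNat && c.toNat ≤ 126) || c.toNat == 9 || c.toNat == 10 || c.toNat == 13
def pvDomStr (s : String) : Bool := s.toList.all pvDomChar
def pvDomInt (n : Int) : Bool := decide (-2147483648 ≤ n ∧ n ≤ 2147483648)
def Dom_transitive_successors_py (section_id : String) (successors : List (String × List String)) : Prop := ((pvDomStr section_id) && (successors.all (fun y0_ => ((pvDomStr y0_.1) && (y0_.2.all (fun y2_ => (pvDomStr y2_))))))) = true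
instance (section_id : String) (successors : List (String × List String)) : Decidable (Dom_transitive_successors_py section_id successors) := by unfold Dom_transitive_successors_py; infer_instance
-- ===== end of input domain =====

-- B replaces A's single deque worklist by level-by-level frontier expansion (same reachable set,
-- same first-insertion order); objective: alternative decomposition, no speed claim.

-- ===== PORT A =====
-- shared helpers: successors.get(s, set()) on the association list, plus the node universe and
-- remaining-node count, used only to justify termination of the two loops.

def tsUniv (successors : List (String × List String)) : List String :=
  PySem.List.dedup (successors.flatMap (fun p => p.1 :: p.2))

def tsGet (successors : List (String × List String)) (s : String) : List String :=
  PySem.Dict.getD (PySem.Dict.mk successors) s []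

def tsRem (successors : List (String × List String)) (R : List String) : Nat :=
  ((tsUniv successors).filter (fun x => !(PySem.Set.contains R x))).length

theorem tsGet_subset_univ (successors : List (String × List String)) (s : String) :
    ∀ x ∈ tsGet successors s, x ∈ tsUniv successors := by
  intro x hx
  simp only [tsUniv, PySem.List.mem_dedup, List.mem_flatMap]
  induction successors with
  | nil => simp [tsGet, PySem.Dict.getD, PySem.Dict.get?] at hx
  | cons p rest ih =>
    obtain ⟨k, v⟩ := p
    simp only [tsGet, PySem.Dict.getD_eq_get?_getD, PySem.Dict.get?_mk_cons] at hx ih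
    by_cases h : k == s
    · simp only [h, if_pos, Option.getD_some] at hx
      exact ⟨(k, v), List.mem_cons_self .., by simp [hx]⟩
    · simp only [h, if_neg, Bool.false_eq_true, not_false_iff] at hx
      obtain ⟨q, hq, hmem⟩ := ih hx
      exact ⟨q, List.mem_cons_of_mem _ hq, hmem⟩

theorem tsGet_of_not_univ (successors : List (String × List String)) (s : String)
    (h : s ∉ tsUniv successors) : tsGet successors s = [] := by
  induction successors with
  | nil => simp [tsGet, PySem.Dict.getD, PySem.Dict.get?]
  | cons p rest ih =>
    obtain ⟨k, v⟩ := p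
    simp only [tsUniv, PySem.List.mem_dedup, List.mem_flatMap] at h ih
    simp only [tsGet, PySem.Dict.getD_eq_get?_getD, PySem.Dict.get?_mk_cons] at ih ⊢
    have hne : ¬ (k == s) = true := by
      intro hb
      exact h ⟨(k, v), List.mem_cons_self .., by simp [(beq_iff_eq.mp hb)]⟩
    simp only [hne, if_neg, Bool.false_eq_true, not_false_iff]
    exact ih (fun ⟨q, hq, hm⟩ => h ⟨q, List.mem_cons_of_mem _ hq, hm⟩)

theorem tsGet_len_le (successors : List (String × List String)) (s : String) :
    (tsGet successors s).length ≤ (successors.flatMap (fun p => p.2)).length := by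
  induction successors with
  | nil => simp [tsGet, PySem.Dict.getD, PySem.Dict.get?]
  | cons p rest ih =>
    obtain ⟨k, v⟩ := p
    simp only [tsGet, PySem.Dict.getD_eq_get?_getD, PySem.Dict.get?_mk_cons] at ih ⊢
    by_cases h : k == s
    · simp only [h, if_pos, Option.getD_some, List.flatMap_cons, List.length_append]
      omega
    · simp only [h, Bool.false_eq_true, if_neg, not_false_iff, List.flatMap_cons,
        List.length_append]
      omega

theorem tsRem_le (successors : List (String × List String)) (R R' : List String)
    (hsub : ∀ x, x ∈ R → x ∈ R') :
    tsRem successors R' ≤ tsRem successors R := by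
  unfold tsRem
  apply List.Sublist.length_le
  have h1 : ∀ x, (!(PySem.Set.contains R' x)) = true → (!(PySem.Set.contains R x)) = true := by
    intro x hx
    simp only [Bool.not_eq_true'] at hx ⊢
    simp only [PySem.Set.contains_eq_listContains, List.contains_eq_mem, decide_eq_false_iff_not] at hx ⊢
    exact fun hm => hx (hsub x hm)
  exact List.monotone_filter_right _ h1

theorem tsRem_lt (successors : List (String × List String)) (R R' : List String) (f : String)
    (hsub : ∀ x, x ∈ R → x ∈ R') (hf : f ∈ R') (hfR : f ∉ R) (hfU : f ∈ tsUniv successors) :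
    tsRem successors R' < tsRem successors R := by
  unfold tsRem
  have h1 : ∀ x, (!(PySem.Set.contains R' x)) = true → (!(PySem.Set.contains R x)) = true := by
    intro x hx
    simp only [Bool.not_eq_true'] at hx ⊢
    simp only [PySem.Set.contains_eq_listContains, List.contains_eq_mem, decide_eq_false_iff_not] at hx ⊢
    exact fun hm => hx (hsub x hm)
  have hs := List.monotone_filter_right (tsUniv successors) h1
  rcases Nat.lt_or_eq_of_le hs.length_le with h | h
  · exact h
  · exfalso
    have heq := hs.eq_of_length h
    have hfmem : f ∈ (tsUniv successors).filter (fun x => !(PySem.Set.contains R x)) := by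
      simp only [List.mem_filter, Bool.not_eq_true', PySem.Set.contains_eq_listContains,
        List.contains_eq_mem, decide_eq_false_iff_not]
      exact ⟨hfU, hfR⟩
    rw [← heq] at hfmem
    simp only [List.mem_filter, Bool.not_eq_true', PySem.Set.contains_eq_listContains,
      List.contains_eq_mem, decide_eq_false_iff_not] at hfmem
    exact hfmem.2 hf

-- A's while-loop over (result, queue): pop left; skip if already in result; else add to
-- result and extend the queue with the popped node's successors.
def tsBfs (successors : List (String × List String)) (R q : List String) : List String :=
  match q with
  | [] => R
  | sid :: rest =>
    if PySem.Set.contains R sid then tsBfs successors R rest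
    else tsBfs successors (PySem.Set.add R sid) (rest ++ tsGet successors sid)
termination_by tsRem successors R * ((successors.flatMap (fun p => p.2)).length + 1) + q.length
decreasing_by
  · simp only [List.length_cons]
    omega
  · rename_i hc
    simp only [PySem.Set.contains_eq_listContains, List.contains_eq_mem,
      decide_eq_true_eq] at hc
    rw [PySem.Set.add_of_not_mem hc]
    simp only [List.length_append, List.length_cons]
    by_cases hU : sid ∈ tsUniv successors
    · have h1 : tsRem successors (R ++ [sid]) < tsRem successors R :=
        tsRem_lt successors R (R ++ [sid]) sid (fun x h => List.mem_append_left _ h)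
          (by simp) hc hU
      have h2 : (tsGet successors sid).length ≤ (successors.flatMap (fun p => p.2)).length :=
        tsGet_len_le successors sid
      have h3 : tsRem successors (R ++ [sid]) * ((successors.flatMap (fun p => p.2)).length + 1)
          + ((successors.flatMap (fun p => p.2)).length + 1)
          ≤ tsRem successors R * ((successors.flatMap (fun p => p.2)).length + 1) := by
        have := Nat.mul_le_mul_right ((successors.flatMap (fun p => p.2)).length + 1)
          (Nat.succ_le_of_lt h1)
        rwa [Nat.succ_mul] at this
      omega
    · have h1 : tsRem successors (R ++ [sid]) ≤ tsRem successors R :=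
        tsRem_le successors R (R ++ [sid]) (fun x h => List.mem_append_left _ h)
      have h0 : tsGet successors sid = [] := tsGet_of_not_univ successors sid hU
      have h3 : tsRem successors (R ++ [sid]) * ((successors.flatMap (fun p => p.2)).length + 1)
          ≤ tsRem successors R * ((successors.flatMap (fun p => p.2)).length + 1) :=
        Nat.mul_le_mul_right _ h1
      simp only [h0, List.length_nil]
      omega

def transitive_successors_py (section_id : String) (successors : List (String × List String)) : List String :=
  tsBfs successors PySem.Set.empty (tsGet successors section_id)

-- ===== PORT B =====
-- loop invariant carried by B's frontier (nodup, disjoint from result, inside the universe);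
-- it justifies termination of the layer loop.
def tsInv (successors : List (String × List String)) (R F : List String) : Prop :=
  F.Nodup ∧ (∀ x ∈ F, x ∉ R) ∧ (∀ x ∈ F, x ∈ tsUniv successors)

theorem tsInv_step (successors : List (String × List String)) (R F : List String)
    (_ : tsInv successors R F) :
    tsInv successors (PySem.Set.union R F)
      (PySem.Set.diff (PySem.Set.ofList (F.flatMap (fun s => tsGet successors s)))
        (PySem.Set.union R F)) := by
  refine ⟨PySem.Set.nodup_diff _ _ (PySem.Set.nodup_ofList _), ?_, ?_⟩
  · intro x hx
    rw [PySem.Set.mem_diff _ _ x] at hx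
    exact hx.2
  · intro x hx
    rw [PySem.Set.mem_diff _ _ x, PySem.Set.mem_ofList] at hx
    obtain ⟨s, _, hm⟩ := List.mem_flatMap.mp hx.1
    exact tsGet_subset_univ successors s x hm

theorem tsRem_union_lt (successors : List (String × List String)) (R F : List String)
    (h : tsInv successors R F) (hne : F ≠ []) :
    tsRem successors (PySem.Set.union R F) < tsRem successors R := by
  obtain ⟨f, hf⟩ := List.exists_mem_of_ne_nil F hne
  exact tsRem_lt successors R (PySem.Set.union R F) f
    (fun x hx => (PySem.Set.mem_union _ _ _).mpr (Or.inl hx))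
    ((PySem.Set.mem_union _ _ _).mpr (Or.inr hf)) (h.2.1 f hf) (h.2.2 f hf)

-- B's while-loop: result |= frontier; next frontier = union of the successors of the
-- frontier's nodes, minus result.
def tsLayer (successors : List (String × List String)) (R F : List String)
    (h : tsInv successors R F) : List String :=
  if hne : F = [] then R
  else
    tsLayer successors (PySem.Set.union R F)
      (PySem.Set.diff (PySem.Set.ofList (F.flatMap (fun s => tsGet successors s)))
        (PySem.Set.union R F))
      (tsInv_step successors R F h)
termination_by tsRem successors R
decreasing_by exact tsRem_union_lt successors R F h hne

theorem tsInv_init (successors : List (String × List String)) (g : List String)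
    (hg : ∀ x ∈ g, x ∈ tsUniv successors) :
    tsInv successors PySem.Set.empty
      (PySem.Set.diff (PySem.Set.ofList g) PySem.Set.empty) := by
  refine ⟨PySem.Set.nodup_diff _ _ (PySem.Set.nodup_ofList _), ?_, ?_⟩
  · intro x hx
    rw [PySem.Set.mem_diff _ _ x] at hx
    exact hx.2
  · intro x hx
    rw [PySem.Set.mem_diff _ _ x, PySem.Set.mem_ofList] at hx
    exact hg x hx.1

def transitive_successors_py_alt (section_id : String) (successors : List (String × List String)) : List String :=
  tsLayer successors PySem.Set.empty
    (PySem.Set.diff (PySem.Set.ofList (tsGet successors section_id)) PySem.Set.empty)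
    (tsInv_init successors (tsGet successors section_id) (tsGet_subset_univ successors section_id))

-- ===== PRECONDITION & SPEC =====
def Spec_transitive_successors_py (section_id : String) (successors : List (String × List String)) (out : List String) : Prop := out = transitive_successors_py_alt section_id successors
instance (section_id : String) (successors : List (String × List String)) (out : List String) : Decidable (Spec_transitive_successors_py section_id successors out) := by unfold Spec_transitive_successors_py; infer_instance

-- ===== CLAIM (what is proved, stated in full; the proofs are below) =====
def Claim_equal_transitive_successors_py : Prop := ∀ (section_id : String) (successors : List (String × List String)), Dom_transitive_successors_py section_id successors → Spec_transitive_successors_py section_id successors (transitive_successors_py section_id successors)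

-- ===== LEMMAS AND PROOFS =====

theorem clean_cons_mem (R Q : List String) (x : String) (hx : x ∈ R) :
    PySem.Set.diff (PySem.Set.ofList (x :: Q)) R = PySem.Set.diff (PySem.Set.ofList Q) R := by
  show (PySem.Set.ofList (x :: Q)).filter _ = (PySem.Set.ofList Q).filter _
  rw [PySem.Set.ofList_cons]
  show List.filter _ (x :: List.filter _ _) = _
  simp only [List.filter_cons]
  have hcx : PySem.Set.contains R x = true := by
    simp only [PySem.Set.contains_eq_listContains, List.contains_eq_mem, decide_eq_true_eq]
    exact hx
  rw [hcx]
  simp only [Bool.not_true, if_neg (by simp : ¬ (false = true))]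
  rw [List.filter_filter]
  congr 1
  funext y
  by_cases hyx : (y == x) = true
  · have : y = x := beq_iff_eq.mp hyx
    subst this
    simp only [hcx, Bool.not_true, Bool.false_and, beq_self_eq_true, Bool.and_true]
  · simp [hyx]

theorem clean_cons_not_mem (R Q : List String) (x : String) (hx : x ∉ R) :
    PySem.Set.diff (PySem.Set.ofList (x :: Q)) R
      = x :: PySem.Set.diff (PySem.Set.ofList Q) (R ++ [x]) := by
  show (PySem.Set.ofList (x :: Q)).filter _ = x :: (PySem.Set.ofList Q).filter _
  rw [PySem.Set.ofList_cons]
  show List.filter _ (x :: List.filter _ _) = _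
  simp only [List.filter_cons]
  have hcx : PySem.Set.contains R x = false := by
    simp only [PySem.Set.contains_eq_listContains, List.contains_eq_mem, decide_eq_false_iff_not]
    exact hx
  rw [hcx]
  simp only [Bool.not_false, if_true, List.filter_filter]
  congr 1
  apply List.filter_congr
  intro y _
  simp only [PySem.Set.contains_eq_listContains, List.contains_append, List.contains_cons,
    List.contains_nil]
  by_cases hyx : (y == x) = true
  · simp [hyx]
  · simp [hyx]

theorem tsBfs_nil (successors : List (String × List String)) (R : List String) :
    tsBfs successors R [] = R := by
  rw [tsBfs]

theorem tsBfs_cons_mem (successors : List (String × List String)) (R q : List String)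
    (x : String) (hx : x ∈ R) :
    tsBfs successors R (x :: q) = tsBfs successors R q := by
  rw [tsBfs]
  simp only [PySem.Set.contains_eq_listContains, List.contains_eq_mem, decide_eq_true_eq]
  rw [if_pos hx]

theorem tsBfs_cons_not_mem (successors : List (String × List String)) (R q : List String)
    (x : String) (hx : x ∉ R) :
    tsBfs successors R (x :: q) = tsBfs successors (R ++ [x]) (q ++ tsGet successors x) := by
  rw [tsBfs]
  simp only [PySem.Set.contains_eq_listContains, List.contains_eq_mem, decide_eq_true_eq]
  rw [if_neg hx, PySem.Set.add_of_not_mem hx]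

theorem tsBfs_consume (successors : List (String × List String)) :
    ∀ (F R T : List String), F.Nodup → (∀ x ∈ F, x ∉ R) →
      tsBfs successors R (F ++ T)
        = tsBfs successors (R ++ F) (T ++ F.flatMap (fun s => tsGet successors s)) := by
  intro F
  induction F with
  | nil => intro R T _ _; simp
  | cons f F ih =>
    intro R T hnd hdis
    rw [List.cons_append, tsBfs_cons_not_mem successors R (F ++ T) f (hdis f (by simp))]
    rw [List.append_assoc, ih (R ++ [f]) (T ++ tsGet successors f) hnd.of_cons ?hdis]
    · simp only [List.append_assoc, List.flatMap_cons]
      rfl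
    case hdis =>
      intro x hxF
      simp only [List.mem_append, List.mem_singleton, not_or]
      exact ⟨hdis x (List.mem_cons_of_mem _ hxF), fun hxf => (List.nodup_cons.mp hnd).1 (hxf ▸ hxF)⟩

theorem tsBfs_clean (successors : List (String × List String)) :
    ∀ (n : Nat) (R Q T : List String),
      tsRem successors R * ((successors.flatMap (fun p => p.2)).length + 1) + Q.length ≤ n →
      tsBfs successors R (Q ++ T)
        = tsBfs successors R (PySem.Set.diff (PySem.Set.ofList Q) R ++ T) := by
  intro n
  induction n with
  | zero =>
    intro R Q T hm
    match Q with
    | [] => rfl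
    | x :: Q => simp at hm
  | succ n ih =>
    intro R Q T hm
    match Q with
    | [] => rfl
    | x :: Q =>
      by_cases hx : x ∈ R
      · rw [List.cons_append, tsBfs_cons_mem successors R (Q ++ T) x hx,
          clean_cons_mem R Q x hx]
        exact ih R Q T (by simp only [List.length_cons] at hm; omega)
      · rw [List.cons_append, tsBfs_cons_not_mem successors R (Q ++ T) x hx,
          clean_cons_not_mem R Q x hx, List.cons_append,
          tsBfs_cons_not_mem successors R _ x hx, List.append_assoc, List.append_assoc,
          ih (R ++ [x]) Q (T ++ tsGet successors x) ?hm]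
        case hm =>
          simp only [List.length_cons] at hm
          by_cases hU : x ∈ tsUniv successors
          · have h1 : tsRem successors (R ++ [x]) < tsRem successors R :=
              tsRem_lt successors R (R ++ [x]) x (fun y h => List.mem_append_left _ h)
                (by simp) hx hU
            have h3 : tsRem successors (R ++ [x]) * ((successors.flatMap (fun p => p.2)).length + 1)
                + ((successors.flatMap (fun p => p.2)).length + 1)
                ≤ tsRem successors R * ((successors.flatMap (fun p => p.2)).length + 1) := by
              have := Nat.mul_le_mul_right ((successors.flatMap (fun p => p.2)).length + 1)
                (Nat.succ_le_of_lt h1)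
              rwa [Nat.succ_mul] at this
            omega
          · have h1 : tsRem successors (R ++ [x]) ≤ tsRem successors R :=
              tsRem_le successors R (R ++ [x]) (fun y h => List.mem_append_left _ h)
            have h3 : tsRem successors (R ++ [x]) * ((successors.flatMap (fun p => p.2)).length + 1)
                ≤ tsRem successors R * ((successors.flatMap (fun p => p.2)).length + 1) :=
              Nat.mul_le_mul_right _ h1
            omega

theorem tsBfs_eq_tsLayer (successors : List (String × List String)) :
    ∀ (n : Nat) (R F : List String) (h : tsInv successors R F),
      tsRem successors R ≤ n → tsBfs successors R F = tsLayer successors R F h := by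
  intro n
  induction n with
  | zero =>
    intro R F h hn
    by_cases hne : F = []
    · subst hne; rw [tsBfs_nil, tsLayer, dif_pos rfl]
    · exfalso
      have := tsRem_union_lt successors R F h hne
      omega
  | succ n ih =>
    intro R F h hn
    by_cases hne : F = []
    · subst hne; rw [tsBfs_nil, tsLayer, dif_pos rfl]
    · have hRF : PySem.Set.union R F = R ++ F :=
        PySem.Set.update_eq_append_of_disjoint R F h.1 h.2.1
      have step1 : tsBfs successors R F
          = tsBfs successors (R ++ F) (F.flatMap (fun s => tsGet successors s)) := by
        have := tsBfs_consume successors F R [] h.1 h.2.1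
        simpa using this
      have step2 : tsBfs successors (R ++ F) (F.flatMap (fun s => tsGet successors s))
          = tsBfs successors (R ++ F)
              (PySem.Set.diff (PySem.Set.ofList (F.flatMap (fun s => tsGet successors s)))
                (R ++ F)) := by
        have := tsBfs_clean successors
          (tsRem successors (R ++ F) * ((successors.flatMap (fun p => p.2)).length + 1)
            + (F.flatMap (fun s => tsGet successors s)).length)
          (R ++ F) (F.flatMap (fun s => tsGet successors s)) [] (le_refl _)
        simpa using this
      have hlt : tsRem successors (PySem.Set.union R F) ≤ n := by
        have := tsRem_union_lt successors R F h hne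
        omega
      rw [step1, step2, ← hRF]
      rw [ih (PySem.Set.union R F)
        (PySem.Set.diff (PySem.Set.ofList (F.flatMap (fun s => tsGet successors s)))
          (PySem.Set.union R F)) (tsInv_step successors R F h) hlt]
      conv_rhs => rw [tsLayer]
      rw [dif_neg hne]

-- ===== VERDICT (by name: the statement is the Claim_ definition above) =====
theorem transitive_successors_py_spec : Claim_equal_transitive_successors_py := by
  intro section_id successors _
  unfold Spec_transitive_successors_py transitive_successors_py transitive_successors_py_alt
  have hclean := tsBfs_clean successors
    (tsRem successors PySem.Set.empty * ((successors.flatMap (fun p => p.2)).length + 1)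
      + (tsGet successors section_id).length)
    PySem.Set.empty (tsGet successors section_id) [] (le_refl _)
  simp only [List.append_nil] at hclean
  rw [hclean]
  exact tsBfs_eq_tsLayer successors (tsRem successors PySem.Set.empty) PySem.Set.empty
    (PySem.Set.diff (PySem.Set.ofList (tsGet successors section_id)) PySem.Set.empty)
    (tsInv_init successors (tsGet successors section_id) (tsGet_subset_univ successors section_id))
    (le_refl _)
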